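-- pv_equiv track=rewrite | github.com/peterwaksman/Narwhal | narwhal/nwfind.py | isdigitFL
-- ===== SOURCE A (Python) =====
-- def isdigitFL(token):
--     pcount = 0 #count periods
--     for i in range( len(token) ) :
--         if token[i]=='.':
--             pcount += 1
--         elif not token[i].isdigit():
--             return False
--     if pcount==1:
--         return True
--     else:
--         return False
-- ===== SOURCE B (Python) =====
-- def isdigitFL(token):
--     parts = token.split('.')
--     return len(parts) == 2 and all(c.isdigit() for c in parts[0] + parts[1])
-- ===== Notes on version B (the rewrite author's own statement) =====
-- stated objective: alternative
-- what changed: Instead of A's index loop that counts periods while early-returning on invalid characters, B splits the token at the period character and checks that the split yields exactly two segments whose concatenation is all digits.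
import Mathlib
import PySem

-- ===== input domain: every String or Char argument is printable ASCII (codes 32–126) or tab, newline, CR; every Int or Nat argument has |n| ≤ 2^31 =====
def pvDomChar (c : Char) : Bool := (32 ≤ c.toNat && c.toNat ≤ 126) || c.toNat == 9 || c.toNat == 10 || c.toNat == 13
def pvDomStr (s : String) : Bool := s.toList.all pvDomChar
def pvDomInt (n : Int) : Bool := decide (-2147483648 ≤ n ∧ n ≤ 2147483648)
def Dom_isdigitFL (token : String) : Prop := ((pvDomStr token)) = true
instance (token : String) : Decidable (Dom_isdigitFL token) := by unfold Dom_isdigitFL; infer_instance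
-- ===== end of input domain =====

-- B replaces A's scan-and-count loop by splitting the token at the period character and checking the two resulting segments (same cost; simpler decomposition).

-- ===== PORT A =====
-- A's for-loop over indices with the running period count; early 'return False' is the 'false' branch.
def isdigitFLgo : List Char → Int → Bool
  | [], pcount => pcount == 1
  | c :: rest, pcount =>
      if c == '.' then isdigitFLgo rest (pcount + 1)
      else if PySem.Chars.isdigit c then isdigitFLgo rest pcount
      else false

def isdigitFL (token : String) : Bool := isdigitFLgo token.toList 0

-- ===== PORT B =====
-- parts = token.split('.');  len(parts) == 2 and all(c.isdigit() for c in parts[0] + parts[1])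
def isdigitFL_alt (token : String) : Bool :=
  let parts := PySem.Chars.splitOn token.toList ['.']
  parts.length == 2 && ((parts.getD 0 [] ++ parts.getD 1 []).all PySem.Chars.isdigit)


-- ===== PRECONDITION & SPEC =====
def Spec_isdigitFL (token : String) (out : Bool) : Prop := out = isdigitFL_alt token
instance (token : String) (out : Bool) : Decidable (Spec_isdigitFL token out) := by unfold Spec_isdigitFL; infer_instance

-- ===== CLAIM (what is proved, stated in full; the proofs are below) =====
def Claim_equal_isdigitFL : Prop := ∀ (token : String), Dom_isdigitFL token → Spec_isdigitFL token (isdigitFL token)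

-- ===== LEMMAS AND PROOFS =====

-- definitional unfolding of the port (zeta-reduces the 'parts' binding)
theorem alt_unfold (token : String) : isdigitFL_alt token =
    ((PySem.Chars.splitOn token.toList ['.']).length == 2 &&
      (((PySem.Chars.splitOn token.toList ['.']).getD 0 []) ++
        ((PySem.Chars.splitOn token.toList ['.']).getD 1 [])).all PySem.Chars.isdigit) := rfl

-- A's loop computes: all characters valid AND pcount + (#periods in the rest) = 1
theorem isdigitFLgo_eq (cs : List Char) (p : Int) :
    isdigitFLgo cs p =
      ((cs.all (fun c => c == '.' || PySem.Chars.isdigit c)) && (p + (cs.count '.' : Int) == 1)) := by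
  induction cs generalizing p with
  | nil => simp [isdigitFLgo]
  | cons c rest ih =>
      by_cases h : c = '.'
      · subst h
        have harith : p + 1 + (rest.count '.' : Int) = p + ((rest.count '.' : Int) + 1) := by ring
        simp [isdigitFLgo, ih, harith]
      · by_cases hd : PySem.Chars.isdigit c = true
        · simp [isdigitFLgo, h, hd, ih]
        · simp [isdigitFLgo, h, hd]

-- splitting at a single-character separator yields (count + 1) pieces…
theorem splitOn_go_length (l : List Char) : ∀ (fuel : Nat) (cur : List Char) (acc : List (List Char)),
    l.length < fuel →
    (PySem.Chars.splitOn.go ['.'] fuel l cur acc).length = acc.length + 1 + l.count '.' := by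
  induction l with
  | nil =>
      intro fuel cur acc hf
      cases fuel with
      | zero => omega
      | succ f => simp [PySem.Chars.splitOn.go]
  | cons c rest ih =>
      intro fuel cur acc hf
      cases fuel with
      | zero => simp at hf
      | succ f =>
          have hr : rest.length < f := by simp at hf; omega
          by_cases h : c = '.'
          · subst h
            have hp : (['.'] : List Char).isPrefixOf ('.' :: rest) = true := by
              simp [List.isPrefixOf]
            simp only [PySem.Chars.splitOn.go, hp, if_true, List.length_cons, List.drop_succ_cons,
              List.length_nil, List.drop_zero]
            rw [ih f [] (cur.reverse :: acc) hr]
            simp [List.count_cons]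
            omega
          · have hp : (['.'] : List Char).isPrefixOf (c :: rest) = false := by
              simp [List.isPrefixOf, Ne.symm h]
            simp only [PySem.Chars.splitOn.go, hp, Bool.false_eq_true, if_false]
            rw [ih f (c :: cur) acc hr]
            simp [List.count_cons]
            omega
  termination_by l.length

-- …whose concatenation is the token with the separators removed
theorem splitOn_go_flatten (l : List Char) : ∀ (fuel : Nat) (cur : List Char) (acc : List (List Char)),
    l.length < fuel →
    (PySem.Chars.splitOn.go ['.'] fuel l cur acc).flatten =
      acc.reverse.flatten ++ cur.reverse ++ l.filter (fun c => !(c == '.')) := by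
  induction l with
  | nil =>
      intro fuel cur acc hf
      cases fuel with
      | zero => omega
      | succ f => simp [PySem.Chars.splitOn.go]
  | cons c rest ih =>
      intro fuel cur acc hf
      cases fuel with
      | zero => simp at hf
      | succ f =>
          have hr : rest.length < f := by simp at hf; omega
          by_cases h : c = '.'
          · subst h
            have hp : (['.'] : List Char).isPrefixOf ('.' :: rest) = true := by
              simp [List.isPrefixOf]
            simp only [PySem.Chars.splitOn.go, hp, if_true, List.length_cons, List.drop_succ_cons,
              List.length_nil, List.drop_zero]
            rw [ih f [] (cur.reverse :: acc) hr]
            simp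
          · have hp : (['.'] : List Char).isPrefixOf (c :: rest) = false := by
              simp [List.isPrefixOf, Ne.symm h]
            simp only [PySem.Chars.splitOn.go, hp, Bool.false_eq_true, if_false]
            rw [ih f (c :: cur) acc hr]
            simp [h]
  termination_by l.length

theorem splitOn_dot_length (cs : List Char) :
    (PySem.Chars.splitOn cs ['.']).length = cs.count '.' + 1 := by
  unfold PySem.Chars.splitOn
  rw [splitOn_go_length cs (cs.length + 1) [] [] (by omega)]
  simp
  omega

theorem splitOn_dot_flatten (cs : List Char) :
    (PySem.Chars.splitOn cs ['.']).flatten = cs.filter (fun c => !(c == '.')) := by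
  unfold PySem.Chars.splitOn
  rw [splitOn_go_flatten cs (cs.length + 1) [] [] (by omega)]
  simp

theorem two_parts_concat (parts : List (List Char)) (h : parts.length = 2) :
    parts.getD 0 [] ++ parts.getD 1 [] = parts.flatten := by
  match parts, h with
  | [a, b], _ => simp

-- B equals the same characterisation as A's loop
theorem alt_eq (token : String) :
    isdigitFL_alt token =
      ((token.toList.all (fun c => c == '.' || PySem.Chars.isdigit c)) &&
        ((0 : Int) + (token.toList.count '.' : Int) == 1)) := by
  rw [alt_unfold]
  set cs := token.toList with hcs
  by_cases hc : cs.count '.' = 1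
  · have hlen : (PySem.Chars.splitOn cs ['.']).length = 2 := by
      rw [splitOn_dot_length, hc]
    rw [two_parts_concat _ hlen, splitOn_dot_flatten]
    simp only [hlen, hc]
    norm_num
  · have hlen : ((PySem.Chars.splitOn cs ['.']).length == 2) = false := by
      simp [splitOn_dot_length]; omega
    have h2 : ((0 : Int) + (cs.count '.' : Int) == 1) = false := by
      simp; omega
    rw [hlen, h2, Bool.false_and, Bool.and_false]

-- ===== VERDICT (by name: the statement is the Claim_ definition above) =====
theorem isdigitFL_spec : Claim_equal_isdigitFL := by
  intro token _
  unfold Spec_isdigitFL isdigitFL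
  rw [isdigitFLgo_eq, alt_eq]
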